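-- pv_equiv track=rewrite | github.com/michalmonday/xohw23-121 | jupyter_notebooks/data_exploration/ecg_data/examine_ecg_data.py | calculate_diff_similarities
-- ===== SOURCE A (Python) =====
-- def number_of_zeros_in_int(num, bits_size=1024):
--     count = 0
--     for i in range(bits_size):
--         if num & 1 == 0:
--             count += 1
--         num >>= 1
--     return count
--
-- def calculate_diff_similarities(int_representations, bits_size=512):
--     similarities = [0]
--     for i, val_str in enumerate(int_representations):
--         if i == 0:
--             continue
--         val = int(val_str)
--         prev_val = int(int_representations[i-1])
--         similarity = number_of_zeros_in_int(val ^ prev_val, bits_size=bits_size) # / 1024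
--         similarities.append(similarity)
--     return similarities
-- ===== SOURCE B (Python) =====
-- def calculate_diff_similarities(int_representations, bits_size=512):
--     # Zeros in the (possibly empty) bits_size-bit window of the XOR of each
--     # consecutive pair, in closed form via popcount; [0] for the first element.
--     width = max(bits_size, 0)
--     mask = (1 << width) - 1
--     return [0] + [width - ((int(cur) ^ int(prev)) & mask).bit_count()
--                   for prev, cur in zip(int_representations, int_representations[1:])]
-- ===== Notes on version B (the rewrite author's own statement) =====
-- stated objective: faster
-- what changed: Replaces the per-pair O(bits_size) bit-by-bit counting loop (and the index-based outer loop) by a single comprehension over zip of consecutive pairs that masks the XOR to the bits_size-bit window and computes the zero count in closed form as width - popcount.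
import Mathlib
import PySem

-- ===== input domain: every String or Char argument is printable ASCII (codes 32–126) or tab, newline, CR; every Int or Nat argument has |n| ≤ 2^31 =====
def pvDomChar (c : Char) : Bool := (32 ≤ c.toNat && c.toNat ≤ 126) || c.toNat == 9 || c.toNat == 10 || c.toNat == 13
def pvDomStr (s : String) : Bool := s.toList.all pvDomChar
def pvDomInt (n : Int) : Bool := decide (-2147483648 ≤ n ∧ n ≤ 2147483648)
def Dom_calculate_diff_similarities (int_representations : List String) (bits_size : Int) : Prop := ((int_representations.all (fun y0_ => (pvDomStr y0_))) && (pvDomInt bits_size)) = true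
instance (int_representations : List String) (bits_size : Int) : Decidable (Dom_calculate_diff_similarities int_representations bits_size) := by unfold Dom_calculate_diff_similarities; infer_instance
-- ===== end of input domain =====

-- B drops the bit-by-bit zero-counting loop: for each consecutive pair it masks the XOR to the
-- (possibly empty, for negative bits_size) bits_size-bit window and takes width - popcount
-- (objective: faster by mechanism — one popcount per pair instead of a loop over bits_size).

-- ===== PORT A =====
def number_of_zeros_in_int (num : Int) (bits_size : Int) : Int :=
  -- count = 0; for i in range(bits_size): if num & 1 == 0: count += 1; num >>= 1
  ((PySem.List.pyRange 0 bits_size).foldl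
    (fun (st : Int × Int) _ =>
      ((if PySem.Int.band st.2 1 == 0 then st.1 + 1 else st.1), st.2 >>> (1 : Nat)))
    (0, num)).1

def calculate_diff_similarities (int_representations : List String) (bits_size : Int) : List Int :=
  (PySem.List.enumerate int_representations).foldl
    (fun similarities (p : Int × String) =>
      if p.1 == 0 then similarities
      else
        let val := (PySem.Int.ofStr? p.2).getD 0
        let prev_val := ((PySem.List.pyGet? int_representations (p.1 - 1)).bind PySem.Int.ofStr?).getD 0
        similarities ++ [number_of_zeros_in_int (PySem.Int.bxor val prev_val) bits_size])
    [0]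

-- ===== PORT B =====
def calculate_diff_similarities_alt (int_representations : List String) (bits_size : Int) : List Int :=
  -- width = max(bits_size, 0); mask = (1 << width) - 1
  -- [0] + [width - ((int(cur) ^ int(prev)) & mask).bit_count()
  --        for prev, cur in zip(int_representations, int_representations[1:])]
  let width : Int := max bits_size 0
  let mask : Int := (1 <<< width.toNat) - 1
  0 :: (List.zip int_representations (int_representations.drop 1)).map
    (fun pc =>
      width -
        (PySem.Int.bitCount
          (PySem.Int.band
            (PySem.Int.bxor ((PySem.Int.ofStr? pc.2).getD 0) ((PySem.Int.ofStr? pc.1).getD 0))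
            mask) : Int))

-- ===== PRECONDITION & SPEC =====
-- Pre_ excludes exactly the inputs where A raises: with at least two elements, every element
-- must be parsed by int() (otherwise A raises ValueError; B raises there too).
def Pre_calculate_diff_similarities (int_representations : List String) (bits_size : Int) : Prop :=
  2 ≤ int_representations.length →
    ∀ s ∈ int_representations, (PySem.Int.ofStr? s).isSome
instance (int_representations : List String) (bits_size : Int) : Decidable (Pre_calculate_diff_similarities int_representations bits_size) := by unfold Pre_calculate_diff_similarities; infer_instance

def pvWitness_calculate_diff_similarities : List String × Int := (["3", "5"], 4)

def Spec_calculate_diff_similarities (int_representations : List String) (bits_size : Int) (out : List Int) : Prop := out = calculate_diff_similarities_alt int_representations bits_size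
instance (int_representations : List String) (bits_size : Int) (out : List Int) : Decidable (Spec_calculate_diff_similarities int_representations bits_size out) := by unfold Spec_calculate_diff_similarities; infer_instance

-- ===== CLAIM (what is proved, stated in full; the proofs are below) =====
def Claim_equal_calculate_diff_similarities : Prop := ∀ (int_representations : List String) (bits_size : Int), Dom_calculate_diff_similarities int_representations bits_size → Pre_calculate_diff_similarities int_representations bits_size → Spec_calculate_diff_similarities int_representations bits_size (calculate_diff_similarities int_representations bits_size)

-- ===== LEMMAS AND PROOFS =====

lemma toNat_pow_sub_one (n : Nat) : ((2:Int) ^ n - 1).toNat = 2 ^ n - 1 := by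
  have h : (1:Nat) ≤ 2 ^ n := Nat.one_le_two_pow
  have h2 : ((2:Int) ^ n) = ((2 ^ n : Nat) : Int) := by push_cast; ring
  omega

lemma band_mask (n : Nat) (x : Int) :
    PySem.Int.band x ((1 <<< n) - 1) = x % 2 ^ n := by
  have hMn : ((2:Int) ^ n) = ((2 ^ n : Nat) : Int) := by push_cast; ring
  have hMp : (0:Nat) < 2 ^ n := by positivity
  rw [Nat.one_shiftLeft, ← hMn]
  rcases le_or_gt 0 x with hx | hx
  · rw [PySem.Int.band_of_nonneg hx (by rw [hMn]; push_cast; omega), toNat_pow_sub_one,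
        Nat.and_two_pow_sub_one_eq_mod]
    rw [show x = (x.toNat : Int) from (Int.toNat_of_nonneg hx).symm, hMn]
    norm_cast
  · have hxneg : ¬ (0 ≤ x) := by omega
    have hmnn : (0:Int) ≤ 2 ^ n - 1 := by rw [hMn]; push_cast; omega
    unfold PySem.Int.band
    rw [if_neg hxneg, if_pos hmnn, toNat_pow_sub_one]
    set y : Nat := (-x - 1).toNat with hy
    have hxy : x = -((y:Int) + 1) := by omega
    have hand : (2 ^ n - 1) &&& y = y % 2 ^ n := by
      rw [Nat.and_comm, Nat.and_two_pow_sub_one_eq_mod]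
    rw [hand]
    have hr : y % 2 ^ n < 2 ^ n := Nat.mod_lt _ hMp
    have hdmZ : ((2:Int) ^ n) * ((y / 2 ^ n : Nat) : Int) + ((y % 2 ^ n : Nat) : Int) = (y : Int) := by
      exact_mod_cast Nat.div_add_mod y (2 ^ n)
    have key : x % 2 ^ n = ((2:Int) ^ n - 1 - ((y % 2 ^ n : Nat) : Int)) % 2 ^ n := by
      have hrw : x = ((2:Int) ^ n - 1 - ((y % 2 ^ n : Nat) : Int))
          + 2 ^ n * (-((y / 2 ^ n : Nat) : Int) - 1) := by
        rw [hxy]; linear_combination hdmZ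
      rw [hrw, Int.add_mul_emod_self_left]
    rw [key, Int.emod_eq_of_lt (by rw [hMn]; push_cast; omega) (by rw [hMn]; push_cast; omega),
        hMn]
    omega

lemma bitCount_split (n : Nat) (x : Int) :
    (PySem.Int.bitCount (x % 2 ^ (n + 1)) : Int)
      = (x % 2) + (PySem.Int.bitCount ((x >>> (1 : Nat)) % 2 ^ n) : Int) := by
  have hpow : ((2:Int) ^ (n + 1)) = 2 * 2 ^ n := by ring
  have hMp : (0:Int) < 2 ^ (n+1) := by positivity
  have hMp' : (0:Int) < 2 ^ n := by positivity
  have hsh : x >>> (1 : Nat) = x / 2 := by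
    rw [Int.shiftRight_eq_div_pow]; norm_num
  set v : Int := x % 2 ^ (n+1) with hv
  have hv0 : 0 ≤ v := Int.emod_nonneg x (by omega)
  have hvlt : v < 2 ^ (n+1) := Int.emod_lt_of_pos x hMp
  have hv2 : v % 2 = x % 2 := by
    rw [hv]; exact Int.emod_emod_of_dvd x ⟨2 ^ n, by ring⟩
  have hq : x = 2 ^ (n+1) * (x / 2 ^ (n+1)) + v := by have := Int.mul_ediv_add_emod x (2 ^ (n+1)); linarith
  have hdiv : (x / 2) % 2 ^ n = v / 2 := by
    have h1 : x / 2 = v / 2 + 2 ^ n * (x / 2 ^ (n+1)) := by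
      conv_lhs => rw [show x = v + (2 ^ n * (x / 2 ^ (n+1))) * 2 by linear_combination hq]
      rw [Int.add_mul_ediv_right _ _ (by norm_num : (2:Int) ≠ 0)]
    rw [h1, Int.add_mul_emod_self_left, Int.emod_eq_of_lt (by omega)
      (by rw [hpow] at hvlt; omega)]
  rw [hsh, hdiv]
  by_cases h0 : v = 0
  · have : x % 2 = 0 := by rw [← hv2, h0]; rfl
    rw [h0, this]
    norm_num [PySem.Int.bitCount_zero]
  · have hvpos : 0 < v := by omega
    rw [show v / 2 = PySem.Int.floordiv v 2 from (PySem.Int.floordiv_eq_ediv_of_pos (b := 2) (by norm_num)).symm]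
    rw [PySem.Int.bitCount_of_pos hvpos]
    rw [PySem.Int.mod_eq_emod_of_pos (by norm_num), hv2]
    have : 0 ≤ x % 2 := by rw [← hv2]; omega
    push_cast [Int.toNat_of_nonneg this]
    ring

lemma loop_closed (n : Nat) : ∀ (c x : Int),
    ((List.range n).foldl
      (fun (st : Int × Int) (_ : Nat) =>
        ((if PySem.Int.band st.2 1 == 0 then st.1 + 1 else st.1), st.2 >>> (1 : Nat)))
      (c, x)).1 = c + n - (PySem.Int.bitCount (x % 2 ^ n) : Int) := by
  induction n with
  | zero =>
    intro c x
    simp [PySem.Int.bitCount_zero]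
  | succ m ih =>
    intro c x
    rw [List.range_succ_eq_map, List.foldl_cons, List.foldl_map]
    rw [ih]
    have hb1 : PySem.Int.band x 1 = x % 2 := by
      rw [PySem.Int.band_one, PySem.Int.mod_eq_emod_of_pos (by norm_num)]
    have hsplit := bitCount_split m x
    rcases Int.emod_two_eq x with h2 | h2
    · rw [if_pos (by rw [hb1, h2]; rfl)]
      rw [h2] at hsplit
      push_cast
      omega
    · rw [if_neg (by rw [hb1, h2]; decide)]
      rw [h2] at hsplit
      push_cast
      omega

lemma zeros_eq (b : Int) (x : Int) :
    number_of_zeros_in_int x b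
      = max b 0 - (PySem.Int.bitCount (PySem.Int.band x ((1 <<< (max b 0).toNat) - 1)) : Int) := by
  have hw : max b 0 = ((b.toNat : Nat) : Int) := (Int.ofNat_toNat b).symm
  unfold number_of_zeros_in_int
  rw [PySem.List.pyRange_one, show b - 0 = b by ring, hw, Int.toNat_natCast]
  have := loop_closed b.toNat 0 x
  simp only [List.foldl_map] at this ⊢
  rw [this, ← band_mask]
  ring

-- the tail of A's fold, against B's zip of consecutive pairs
lemma foldA (b : Int) (l : List String) :
    ∀ (rest : List String) (k : Nat) (prev : String) (acc : List Int),
    l[k]? = some prev → (∀ j : Nat, l[k + 1 + j]? = rest[j]?) →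
    (PySem.List.enumerate rest ((k : Int) + 1)).foldl
      (fun similarities (p : Int × String) =>
        if p.1 == 0 then similarities
        else
          let val := (PySem.Int.ofStr? p.2).getD 0
          let prev_val := ((PySem.List.pyGet? l (p.1 - 1)).bind PySem.Int.ofStr?).getD 0
          similarities ++ [number_of_zeros_in_int (PySem.Int.bxor val prev_val) b]) acc
      = acc ++ (List.zip (prev :: rest) rest).map
          (fun pc =>
            max b 0 - (PySem.Int.bitCount
              (PySem.Int.band
                (PySem.Int.bxor ((PySem.Int.ofStr? pc.2).getD 0) ((PySem.Int.ofStr? pc.1).getD 0))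
                ((1 <<< (max b 0).toNat) - 1)) : Int)) := by
  intro rest
  induction rest with
  | nil =>
    intro k prev acc _ _
    simp [PySem.List.enumerate]
  | cons c rest' ih =>
    intro k prev acc hget hj
    rw [show PySem.List.enumerate (c :: rest') ((k : Int) + 1)
          = ((k : Int) + 1, c) :: PySem.List.enumerate rest' ((k : Int) + 1 + 1) by
        simp [PySem.List.enumerate]]
    rw [List.foldl_cons]
    rw [if_neg (by simp; omega)]
    have hprev : PySem.List.pyGet? l ((k : Int) + 1 - 1) = some prev := by
      rw [show (k : Int) + 1 - 1 = (k : Int) by ring, PySem.List.pyGet?_natCast, hget]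
    simp only [hprev, Option.bind_some]
    have hcast : (k : Int) + 1 + 1 = ((k + 1 : Nat) : Int) + 1 := by push_cast; ring
    rw [hcast, ih (k + 1) c _
      (by have := hj 0; simpa using this)
      (by intro j; have h2 := hj (j + 1)
          rw [show k + 1 + (j + 1) = k + 1 + 1 + j by omega] at h2
          simpa using h2)]
    rw [List.zip_cons_cons, List.map_cons, zeros_eq b]
    simp [List.append_assoc]

-- ===== VERDICT (by name: the statement is the Claim_ definition above) =====
theorem calculate_diff_similarities_spec : Claim_equal_calculate_diff_similarities := by
  intro l b _ _
  unfold Spec_calculate_diff_similarities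
  match l with
  | [] => simp [calculate_diff_similarities, calculate_diff_similarities_alt, PySem.List.enumerate]
  | [x] => simp [calculate_diff_similarities, calculate_diff_similarities_alt, PySem.List.enumerate]
  | x :: y :: rest =>
    unfold calculate_diff_similarities calculate_diff_similarities_alt
    rw [show PySem.List.enumerate (x :: y :: rest) 0
          = ((0 : Int), x) :: PySem.List.enumerate (y :: rest) (((0 : Nat) : Int) + 1) by
        simp [PySem.List.enumerate]]
    rw [List.foldl_cons, if_pos (by simp)]
    rw [foldA b (x :: y :: rest) (y :: rest) 0 x [0] (by simp) (by intro j; rw [show 0 + 1 + j = 1 + j by omega, show 1 + j = j + 1 by omega]; simp)]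
    simp
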